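-- pv_equiv track=rewrite | github.com/sarelg/advent-of-code-2022 | day7secondtry.py | find_mem
-- ===== SOURCE A (Python) =====
-- def find_mem(data):
--     mem = 0
--     files = []
--     for line in data:
--         if line[0].isnumeric():
--             mem += int(line[0:line.find(' ')])
--             files.append(line)
--     return mem, files
-- ===== SOURCE B (Python) =====
-- def find_mem(data):
--     # divide and conquer: split in half, solve each half, combine (sum + concat)
--     if len(data) == 0:
--         return 0, []
--     if len(data) == 1:
--         line = data[0]
--         if line[0].isnumeric():
--             return int(line[:line.find(' ')]), [line]
--         return 0, []
--     mid = len(data) // 2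
--     m1, f1 = find_mem(data[:mid])
--     m2, f2 = find_mem(data[mid:])
--     return m1 + m2, f1 + f2
-- ===== Notes on version B (the rewrite author's own statement) =====
-- stated objective: alternative
-- what changed: A's single fused left-to-right accumulate-and-collect loop is replaced by a divide-and-conquer recursion: split the list in half, solve each half independently, and combine the results by adding the sums and concatenating the file lists (correct because sum and concatenation are associative).
import Mathlib
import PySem

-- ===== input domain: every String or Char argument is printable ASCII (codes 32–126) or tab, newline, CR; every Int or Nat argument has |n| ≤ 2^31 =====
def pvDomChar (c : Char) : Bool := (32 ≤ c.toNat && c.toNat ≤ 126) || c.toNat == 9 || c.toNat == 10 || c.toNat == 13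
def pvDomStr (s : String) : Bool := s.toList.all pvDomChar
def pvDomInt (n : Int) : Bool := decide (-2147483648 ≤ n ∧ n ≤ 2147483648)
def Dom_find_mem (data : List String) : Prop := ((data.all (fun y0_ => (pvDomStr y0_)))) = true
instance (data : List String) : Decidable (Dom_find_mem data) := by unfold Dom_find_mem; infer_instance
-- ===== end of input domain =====

-- B replaces A's fused left-to-right accumulate-and-collect loop with a divide-and-conquer
-- recursion (split in half, combine by + and ++); alternative structure, similar cost.


-- ===== PORT A =====
-- fused loop: one pass, pair accumulator (mem, files).
-- line[0].isnumeric() is PySem.Chars.isdigit (exact on the ASCII domain);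
-- pyGet? = none (Python IndexError) and ofChars? = none (ValueError) are excluded by Pre_.
def find_mem (data : List String) : Int × List String :=
  data.foldl
    (fun (st : Int × List String) line =>
      match PySem.List.pyGet? line.toList 0 with
      | none => st  -- IndexError in Python; unreachable under Pre_find_mem
      | some c =>
        if PySem.Chars.isdigit c then
          (st.1 + (PySem.Int.ofChars?
              (PySem.Chars.slice line.toList (some 0)
                (some (PySem.Chars.find line.toList [' '])))).getD 0,
           st.2 ++ [line])
        else st)
    (0, [])

-- ===== PORT B =====
-- divide and conquer: empty and singleton base cases, else split at len//2,
-- recurse on both halves (data[:mid] = take, data[mid:] = drop; exact since 0 ≤ mid ≤ len),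
-- combine with + and ++.
def find_mem_alt (data : List String) : Int × List String :=
  match data with
  | [] => (0, [])
  | [line] =>
    if ((PySem.List.pyGet? line.toList 0).map PySem.Chars.isdigit).getD false then
      ((PySem.Int.ofChars?
          (PySem.Chars.slice line.toList none
            (some (PySem.Chars.find line.toList [' '])))).getD 0, [line])
    else (0, [])
  | a :: b :: rest =>
    let mid := (a :: b :: rest).length / 2
    let r1 := find_mem_alt ((a :: b :: rest).take mid)
    let r2 := find_mem_alt ((a :: b :: rest).drop mid)
    (r1.1 + r2.1, r1.2 ++ r2.2)
termination_by data.length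
decreasing_by
  · simp [List.length_take]; omega
  · simp [List.length_drop]; omega

-- ===== PRECONDITION & SPEC =====
-- the prefix int() is applied to: up to the first space, or all but the last char if no space
def pvIntPrefix (cs : List Char) : List Char :=
  if ' ' ∈ cs then cs.takeWhile (· ≠ ' ') else cs.dropLast

-- Pre_ excludes exactly the inputs where Python A raises: an empty line (IndexError) or a
-- digit-headed line whose prefix is not a valid int literal (ValueError).
def Pre_find_mem (data : List String) : Prop :=
  ∀ line ∈ data, line.toList ≠ [] ∧
    (PySem.Chars.isdigit (line.toList.headD ' ') = true →
      (PySem.Int.ofChars? (pvIntPrefix line.toList)).isSome = true)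
instance (data : List String) : Decidable (Pre_find_mem data) := by
  unfold Pre_find_mem; infer_instance

def pvWitness_find_mem : List String := ["123 a.txt", "dir x", "45 b"]

def Spec_find_mem (data : List String) (out : Int × List String) : Prop := out = find_mem_alt data
instance (data : List String) (out : Int × List String) : Decidable (Spec_find_mem data out) := by unfold Spec_find_mem; infer_instance

-- ===== CLAIM (what is proved, stated in full; the proofs are below) =====
def Claim_equal_find_mem : Prop := ∀ (data : List String), Dom_find_mem data → Pre_find_mem data → Spec_find_mem data (find_mem data)

-- ===== LEMMAS AND PROOFS =====

-- the line filter and the per-line value, in simp-normal form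
def pvP (line : String) : Bool :=
  ((PySem.List.pyGet? line.toList 0).map PySem.Chars.isdigit).getD false
def pvV (line : String) : Int :=
  (PySem.Int.ofChars?
    (PySem.List.slice line.toList none
      (some (PySem.Chars.find line.toList [' '])))).getD 0

-- B's divide-and-conquer computes (sum of values over the filtered list, the filtered list)
theorem find_mem_alt_char (data : List String) :
    find_mem_alt data = (((data.filter pvP).map pvV).sum, data.filter pvP) := by
  fun_induction find_mem_alt data with
  | case1 => simp
  | case2 line h =>
    have h' : pvP line = true := h
    simp [h', pvV]
  | case3 line h =>
    have h' : pvP line = false := by simpa using h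
    simp [h']
  | case4 a b rest mid r1 r2 ih1 ih2 =>
    have hsplit : (a :: b :: rest).take mid ++ (a :: b :: rest).drop mid = a :: b :: rest :=
      List.take_append_drop _ _
    have e1 : r1 = _ := ih1
    have e2 : r2 = _ := ih2
    have hf : List.filter pvP (a :: b :: rest)
        = List.filter pvP ((a :: b :: rest).take mid)
          ++ List.filter pvP ((a :: b :: rest).drop mid) := by
      conv_lhs => rw [← hsplit]
      rw [List.filter_append]
    rw [e1, e2]
    simp only [hf, List.map_append, List.sum_append]

-- loop invariant: A's fold from any state is the filter/sum result shifted by that state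
theorem find_mem_fold_eq (data : List String) (m : Int) (fs : List String) :
    data.foldl
      (fun (st : Int × List String) line =>
        match PySem.List.pyGet? line.toList 0 with
        | none => st
        | some c =>
          if PySem.Chars.isdigit c then
            (st.1 + (PySem.Int.ofChars?
                (PySem.List.slice line.toList none
                  (some (PySem.Chars.find line.toList [' '])))).getD 0,
             st.2 ++ [line])
          else st)
      (m, fs)
    = (m + ((data.filter pvP).map pvV).sum, fs ++ data.filter pvP) := by
  induction data generalizing m fs with
  | nil => simp
  | cons line rest ih =>
    simp only [List.foldl_cons, List.filter_cons]
    cases h0 : PySem.List.pyGet? line.toList 0 with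
    | none =>
      simp only [pvP, h0, Option.map_none, Option.getD_none, Bool.false_eq_true, if_false]
      exact ih m fs
    | some c =>
      by_cases hd : PySem.Chars.isdigit c = true
      · simp only [pvP, h0, hd, Option.map_some, Option.getD_some, if_true]
        rw [ih]
        simp [pvV, add_assoc]
      · simp only [pvP, h0, hd, Option.map_some, Option.getD_some, Bool.false_eq_true, if_false]
        exact ih m fs

-- ===== VERDICT (by name: the statement is the Claim_ definition above) =====
theorem find_mem_spec : Claim_equal_find_mem := by
  intro data _ _
  show find_mem data = find_mem_alt data
  rw [find_mem_alt_char]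
  simp only [find_mem, PySem.Chars.slice_eq_listSlice, PySem.List.slice_zero_start]
  rw [find_mem_fold_eq]
  simp
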